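-- pv_equiv track=rewrite | github.com/konmin123/Leetcode_ | 1422. Maximum Score After Splitting a String.py | max_score_brutal
-- ===== SOURCE A (Python) =====
-- def max_score_brutal(str_) -> int:
--     max_sum: int = 0
--     for index in range(1, len(str_)):
--         left: int = str_[:index].count('0')
--         right: int = str_[index:].count('1')
--         if left + right > max_sum:
--             max_sum = left + right
--     return max_sum
-- ===== SOURCE B (Python) =====
-- def max_score_brutal(str_) -> int:
--     # One pass: running zero-count on the left, running ones-remaining on the right.
--     zeros = 0
--     ones = str_.count('1')
--     best = 0
--     for ch in str_[:-1]:
--         if ch == '0':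
--             zeros += 1
--         elif ch == '1':
--             ones -= 1
--         best = max(best, zeros + ones)
--     return best
-- ===== Notes on version B (the rewrite author's own statement) =====
-- stated objective: faster
-- what changed: Replaced recounting '0's in the prefix and '1's in the suffix at every split (nested scans) by a single left-to-right pass that maintains a running zero-count and a running count of ones remaining on the right.
import Mathlib
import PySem

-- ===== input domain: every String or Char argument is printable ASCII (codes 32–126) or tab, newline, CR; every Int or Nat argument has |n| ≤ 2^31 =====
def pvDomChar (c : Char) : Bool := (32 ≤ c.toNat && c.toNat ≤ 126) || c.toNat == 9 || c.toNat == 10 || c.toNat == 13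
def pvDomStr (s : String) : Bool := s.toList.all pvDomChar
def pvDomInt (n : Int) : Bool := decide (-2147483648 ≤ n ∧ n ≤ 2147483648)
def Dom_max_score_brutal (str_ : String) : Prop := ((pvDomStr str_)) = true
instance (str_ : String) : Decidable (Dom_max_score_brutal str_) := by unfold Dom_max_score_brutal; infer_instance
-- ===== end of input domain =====

-- B replaces A's quadratic recount of both sides at every split by one left-to-right pass
-- with a running zero-count and a running ones-remaining count (objective: faster).

-- ===== PORT A =====
def max_score_brutal (str_ : String) : Int :=
  List.foldl
    (fun max_sum index =>
      let left : Int := (PySem.Str.count (PySem.Str.slice str_ none (some index)) "0" : Int)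
      let right : Int := (PySem.Str.count (PySem.Str.slice str_ (some index) none) "1" : Int)
      if left + right > max_sum then left + right else max_sum)
    0 (PySem.List.pyRange 1 (PySem.Str.len str_) 1)

-- ===== PORT B =====
-- one loop step of Source B: update zeros/ones for the character, then take the running max
def bstep (st : Int × Int × Int) (ch : Char) : Int × Int × Int :=
  let zeros := if ch == '0' then st.1 + 1 else st.1
  let ones := if ch == '0' then st.2.1 else if ch == '1' then st.2.1 - 1 else st.2.1
  (zeros, ones, max st.2.2 (zeros + ones))

def max_score_brutal_alt (str_ : String) : Int :=
  let ones0 : Int := (PySem.Str.count str_ "1" : Int)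
  let st := List.foldl bstep (0, ones0, 0) (PySem.Str.slice str_ none (some (-1))).toList
  st.2.2

-- ===== PRECONDITION & SPEC =====
def Spec_max_score_brutal (str_ : String) (out : Int) : Prop := out = max_score_brutal_alt str_
instance (str_ : String) (out : Int) : Decidable (Spec_max_score_brutal str_ out) := by unfold Spec_max_score_brutal; infer_instance

-- ===== CLAIM (what is proved, stated in full; the proofs are below) =====
def Claim_equal_max_score_brutal : Prop := ∀ (str_ : String), Dom_max_score_brutal str_ → Spec_max_score_brutal str_ (max_score_brutal str_)

-- ===== LEMMAS AND PROOFS =====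

-- Python '0' occurrence count of a one-character needle is List.count
theorem chars_count_go_singleton (c : Char) (l : List Char) :
    ∀ (fuel acc : Nat), l.length ≤ fuel →
      PySem.Chars.count.go [c] fuel l acc = acc + l.count c := by
  induction l with
  | nil => intro fuel acc _; cases fuel <;> simp [PySem.Chars.count.go]
  | cons x t ih =>
    intro fuel acc hf
    cases fuel with
    | zero => simp at hf
    | succ n =>
      simp only [List.length_cons] at hf
      by_cases h : c = x
      · subst h
        simp only [PySem.Chars.count.go, List.isPrefixOf, List.count_cons]
        simp [ih n (acc + 1) (by omega)]
        omega
      · simp only [PySem.Chars.count.go, List.isPrefixOf, List.count_cons]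
        have hne : (c == x) = false := by simp [h]
        simp [hne, Ne.symm h, ih n acc (by omega)]

theorem chars_count_singleton (l : List Char) (c : Char) :
    PySem.Chars.count l [c] = l.count c := by
  simp [PySem.Chars.count, chars_count_go_singleton c l l.length 0 le_rfl]

-- score of split i: zeros on the left plus ones on the right
def score (cs : List Char) (i : Nat) : Int :=
  ((cs.take i).count '0' : Int) + ((cs.drop i).count '1' : Int)

-- A rewritten as a fold of scores over List.range
theorem portA_eq (s : String) :
    max_score_brutal s =
      (List.range (s.toList.length - 1)).foldl
        (fun m k => if score s.toList (k + 1) > m then score s.toList (k + 1) else m) 0 := by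
  unfold max_score_brutal
  rw [show PySem.Str.len s = (s.toList.length : Int) from by simp [PySem.Str.len],
      PySem.List.pyRange_one, List.foldl_map]
  have hn : ((s.toList.length : Int) - 1).toNat = s.toList.length - 1 := by omega
  rw [hn]
  apply PySem.List.foldl_congr_mem
  intro acc k hk
  have hsl : (PySem.Str.slice s none (some (1 + (k : Int)))).toList
      = s.toList.take (k + 1) := by
    rw [PySem.Str.toList_slice, PySem.Chars.slice_eq_listSlice,
        PySem.List.slice_to s.toList (by omega)]
    congr 1
    omega
  have hsr : (PySem.Str.slice s (some (1 + (k : Int))) none).toList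
      = s.toList.drop (k + 1) := by
    rw [PySem.Str.toList_slice, PySem.Chars.slice_eq_listSlice,
        PySem.List.slice_from s.toList (by omega)]
    congr 1
    omega
  rw [PySem.Str.count_eq, PySem.Str.count_eq, hsl, hsr]
  show (if _ > acc then _ else _) = _
  simp only [show ("0" : String).toList = ['0'] from rfl,
             show ("1" : String).toList = ['1'] from rfl,
             chars_count_singleton, score]

-- full characterization of B's fold
theorem bfold (l : List Char) (z o b : Int) :
    List.foldl bstep (z, o, b) l =
      (z + (l.count '0' : Int), o - (l.count '1' : Int),
       (List.range l.length).foldl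
         (fun m k => max m ((z + ((l.take (k + 1)).count '0' : Int))
                            + (o - ((l.take (k + 1)).count '1' : Int)))) b) := by
  induction l using List.reverseRecOn with
  | nil => simp
  | append_singleton l c ih =>
    rw [List.foldl_append, ih]
    have hrange : List.range (l ++ [c]).length = List.range l.length ++ [l.length] := by
      simp [List.range_succ]
    rw [hrange, List.foldl_append]
    have htake : ∀ k ∈ List.range l.length,
        (l ++ [c]).take (k + 1) = l.take (k + 1) := by
      intro k hk
      rw [List.mem_range] at hk
      exact List.take_append_of_le_length (by omega)
    have hcongr : (List.range l.length).foldl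
        (fun m k => max m ((z + (((l ++ [c]).take (k + 1)).count '0' : Int))
                           + (o - (((l ++ [c]).take (k + 1)).count '1' : Int)))) b
        = (List.range l.length).foldl
        (fun m k => max m ((z + ((l.take (k + 1)).count '0' : Int))
                           + (o - ((l.take (k + 1)).count '1' : Int)))) b := by
      apply PySem.List.foldl_congr_mem
      intro acc k hk
      rw [htake k hk]
    rw [hcongr]
    have hfull : (l ++ [c]).take (l.length + 1) = l ++ [c] := by
      apply List.take_of_length_le; simp
    simp only [List.foldl_cons, List.foldl_nil, hfull]
    refine Prod.ext ?_ (Prod.ext ?_ ?_)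
    · by_cases h0 : c = '0' <;> simp [bstep, h0, List.count_append] <;> omega
    · by_cases h0 : c = '0'
      · simp [bstep, h0, List.count_append]
      · by_cases h1 : c = '1' <;> simp [bstep, h0, h1, List.count_append] <;> omega
    · show max _ _ = max _ _
      have harith : ∀ ch : Char,
          (if (ch == '0') = true then z + (l.count '0' : Int) + 1 else z + (l.count '0' : Int))
          + (if (ch == '0') = true then o - (l.count '1' : Int)
             else if (ch == '1') = true then o - (l.count '1' : Int) - 1 else o - (l.count '1' : Int))
          = z + (((l ++ [ch]).count '0' : Nat) : Int) + (o - (((l ++ [ch]).count '1' : Nat) : Int)) := by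
        intro ch
        by_cases h0 : ch = '0'
        · simp [h0, List.count_append]
          ring
        · by_cases h1 : ch = '1'
          · simp [h1, List.count_append]
            ring
          · simp [h0, h1, List.count_append]
      simp only
      exact congrArg (max _) (harith c)

-- B rewritten as the same fold of scores
theorem portB_eq (s : String) :
    max_score_brutal_alt s =
      (List.range (s.toList.length - 1)).foldl
        (fun m k => if score s.toList (k + 1) > m then score s.toList (k + 1) else m) 0 := by
  unfold max_score_brutal_alt
  have hsl : (PySem.Str.slice s none (some (-1))).toList = s.toList.dropLast :=
    PySem.Str.slice_to_neg_one s
  rw [PySem.Str.count_eq, show ("1" : String).toList = ['1'] from rfl,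
      chars_count_singleton, hsl]
  show (List.foldl bstep (0, ((s.toList.count '1' : Nat) : Int), 0) s.toList.dropLast).2.2 = _
  rw [bfold]
  simp only [List.length_dropLast]
  apply PySem.List.foldl_congr_mem
  intro acc k hk
  rw [List.mem_range] at hk
  have htake : s.toList.dropLast.take (k + 1) = s.toList.take (k + 1) := by
    rw [List.dropLast_eq_take, List.take_take]
    congr 1
    omega
  rw [htake]
  have hsplit : (s.toList.count '1' : Int)
      = ((s.toList.take (k + 1)).count '1' : Int) + ((s.toList.drop (k + 1)).count '1' : Int) := by
    conv_lhs => rw [← List.take_append_drop (k + 1) s.toList]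
    push_cast [List.count_append]
    ring
  unfold score
  rw [hsplit]
  have : (0 : Int) + ((s.toList.take (k + 1)).count '0' : Int)
      + (((s.toList.take (k + 1)).count '1' : Int) + ((s.toList.drop (k + 1)).count '1' : Int)
         - ((s.toList.take (k + 1)).count '1' : Int))
      = ((s.toList.take (k + 1)).count '0' : Int) + ((s.toList.drop (k + 1)).count '1' : Int) := by
    ring
  rw [this]
  rcases lt_trichotomy acc (((s.toList.take (k + 1)).count '0' : Int) + ((s.toList.drop (k + 1)).count '1' : Int)) with h | h | h
  · rw [max_eq_right h.le, if_pos h]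
  · rw [← h]; simp
  · rw [max_eq_left h.le, if_neg (by omega)]

-- ===== VERDICT (by name: the statement is the Claim_ definition above) =====
theorem max_score_brutal_spec : Claim_equal_max_score_brutal := by
  intro s _
  unfold Spec_max_score_brutal
  rw [portA_eq, portB_eq]
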